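-- pv_equiv track=rewrite | github.com/miliar/Code_Jam_Webscraper | solutions_python/solutions_year15_round0_nr2/939.py | optimize
-- ===== SOURCE A (Python) =====
-- def split(P, d, m):
--     P = list(P)
--     for i in range(len(P)):
--         if P[i] == m:
--             P[i] = m // d
--             P.append(m - P[i])
--             break
--     return P
--
-- def optimize(P, i, best):
--     m = max(P)
--     if m <= 2:
--         return min(best, i + m)
--
--     if i >= best:
--         return best
--
--     Pm1 = [p - 1 for p in P]
--     best = optimize(Pm1, i + 1, best)
--
--     for d in range(2, (m // 2) + 1):
--         best = optimize(split(P, d, m), i + 1, best)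
--
--     return best
-- ===== SOURCE B (Python) =====
-- # B: pure truncated cost function f(P, cap) = min(minutes needed for P, cap) plus one
-- # final min, instead of A's branch-and-bound that threads the depth i and a global
-- # best (updated across siblings) through the DFS.  The cap is fixed per node (and
-- # clamped by max(P), an upper bound on the cost), never propagated between siblings.
--
-- def f(P, cap):
--     m = max(P)
--     if m <= 2:
--         return min(m, cap)
--     cap = min(cap, m)
--     if cap <= 2:
--         return cap
--     best = 1 + f([p - 1 for p in P], cap - 1)
--     for d in range(2, m // 2 + 1):
--         a = m // d
--         j = P.index(m)
--         best = min(best, 1 + f(P[:j] + [a] + P[j + 1:] + [m - a], cap - 1))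
--     return best
--
-- def optimize(P, i, best):
--     return min(best, i + f(P, best - i))
-- ===== Notes on version B (the rewrite author's own statement) =====
-- stated objective: alternative
-- what changed: B replaces A's branch-and-bound (depth counter i and a global best threaded through the DFS, updated across siblings, with an i>=best cut) by a pure cap-truncated cost function f(P, cap) = min(cost(P), cap) over the same move set (cap fixed per node, clamped by max(P)) and a single min(best, i + f(P, best-i)) at the top.
import Mathlib
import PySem

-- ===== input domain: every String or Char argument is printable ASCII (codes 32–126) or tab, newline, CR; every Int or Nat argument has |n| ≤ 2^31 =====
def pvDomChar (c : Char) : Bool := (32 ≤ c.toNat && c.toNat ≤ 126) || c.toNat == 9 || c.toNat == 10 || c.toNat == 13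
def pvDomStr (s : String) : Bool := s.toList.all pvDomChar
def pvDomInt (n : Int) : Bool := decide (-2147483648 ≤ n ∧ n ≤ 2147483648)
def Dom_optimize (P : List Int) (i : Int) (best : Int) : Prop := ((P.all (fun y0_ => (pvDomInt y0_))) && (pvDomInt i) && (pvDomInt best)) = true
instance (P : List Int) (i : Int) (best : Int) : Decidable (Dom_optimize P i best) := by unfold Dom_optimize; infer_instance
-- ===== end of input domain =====

-- B replaces A's branch-and-bound (accumulator best and depth i threaded through the
-- DFS with an i >= best cut and cross-sibling updates) by a pure cap-truncated cost
-- function plus one final min; same return value, no speed claim.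

-- ===== PORT A =====
-- helper: Python split(P, d, m) — replace the first element equal to m by m//d and
-- append m - m//d at the end of the list (unchanged if m does not occur).
def split (P : List Int) (d m : Int) : List Int :=
  match P with
  | [] => []
  | p :: rest =>
    if p = m then
      PySem.Int.floordiv m d :: (rest ++ [m - PySem.Int.floordiv m d])
    else p :: split rest d m

-- A's recursion terminates because every recursive call has i+1 and a best that can
-- only shrink, and recursion happens only while i < best; Lean cannot see that
-- invariant structurally, so the port runs the SAME code on a fuel counter and
-- `optimize` supplies fuel (best - i).toNat + 1, proved sufficient below (optF_eq).
def optimizeF : Nat → List Int → Int → Int → Int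
  | 0, _, _, best => best
  | (fuel + 1), P, i, best =>
    if (PySem.List.max? P (fun y => y)).getD 0 ≤ 2 then
      min best (i + (PySem.List.max? P (fun y => y)).getD 0)
    else if i ≥ best then best
    else
      (PySem.List.pyRange 2 (PySem.Int.floordiv ((PySem.List.max? P (fun y => y)).getD 0) 2 + 1) 1).foldl
        (fun b d => optimizeF fuel (split P d ((PySem.List.max? P (fun y => y)).getD 0)) (i + 1) b)
        (optimizeF fuel (P.map (fun p => p - 1)) (i + 1) best)

def optimize (P : List Int) (i : Int) (best : Int) : Int :=
  optimizeF ((best - i).toNat + 1) P i best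

-- ===== PORT B =====
-- helper: Source B's  P[:j] + [m//d] + P[j+1:] + [m - m//d]  with j = P.index(m); Source B
-- only calls it with m = max(P) ∈ P (Python .index would raise otherwise), so the
-- `none` branch is unreachable at B's call sites and returns P.
def splitB (P : List Int) (d m : Int) : List Int :=
  match PySem.List.index? P m with
  | none => P
  | some j =>
    PySem.List.slice P none (some (j : Int)) ++ [PySem.Int.floordiv m d]
      ++ PySem.List.slice P (some ((j : Int) + 1)) none ++ [m - PySem.Int.floordiv m d]

-- measure under which Source B's f recurses (each recursive call strictly drops it,
-- proved below in mu_map_lt / mu_split_lt)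
def muF (P : List Int) : Nat := (P.map (fun p => (p - 2).toNat)).sum

-- Source B's f(P, cap); Lean cannot see the measure structurally, so the port runs the
-- SAME code on a fuel counter and fAlt supplies fuel muF P + 1, proved sufficient
-- below (fAltF_irrel and the fAlt_* unfolding lemmas).
def fAltF : Nat → List Int → Int → Int
  | 0, _, _ => 0
  | (n + 1), P, cap =>
    if (PySem.List.max? P (fun y => y)).getD 0 ≤ 2 then
      min ((PySem.List.max? P (fun y => y)).getD 0) cap
    else if min cap ((PySem.List.max? P (fun y => y)).getD 0) ≤ 2 then
      min cap ((PySem.List.max? P (fun y => y)).getD 0)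
    else
      (PySem.List.pyRange 2 (PySem.Int.floordiv ((PySem.List.max? P (fun y => y)).getD 0) 2 + 1) 1).foldl
        (fun b d => min b (1 + fAltF n (splitB P d ((PySem.List.max? P (fun y => y)).getD 0))
          (min cap ((PySem.List.max? P (fun y => y)).getD 0) - 1)))
        (1 + fAltF n (P.map (fun p => p - 1)) (min cap ((PySem.List.max? P (fun y => y)).getD 0) - 1))

def fAlt (P : List Int) (cap : Int) : Int := fAltF (muF P + 1) P cap

def optimize_alt (P : List Int) (i : Int) (best : Int) : Int :=
  min best (i + fAlt P (best - i))

-- ===== PRECONDITION & SPEC =====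
-- A (and B) call max(P), which raises ValueError on an empty list; Pre_ excludes
-- exactly the empty list.
def Pre_optimize (P : List Int) (i : Int) (best : Int) : Prop := P ≠ []
instance (P : List Int) (i : Int) (best : Int) : Decidable (Pre_optimize P i best) := by
  unfold Pre_optimize; infer_instance

def pvWitness_optimize : List Int × Int × Int := ([3], 0, 10)

def Spec_optimize (P : List Int) (i : Int) (best : Int) (out : Int) : Prop := out = optimize_alt P i best
instance (P : List Int) (i : Int) (best : Int) (out : Int) : Decidable (Spec_optimize P i best out) := by unfold Spec_optimize; infer_instance

-- ===== CLAIM (what is proved, stated in full; the proofs are below) =====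
def Claim_equal_optimize : Prop := ∀ (P : List Int) (i : Int) (best : Int), Dom_optimize P i best → Pre_optimize P i best → Spec_optimize P i best (optimize P i best)

-- ===== LEMMAS AND PROOFS =====

-- ghost (proof-only) untruncated cost function: gF P = the exact minimum number of
-- minutes A's move set needs for P; both programs are compared against it.
def gFF : Nat → List Int → Int
  | 0, _ => 0
  | (n + 1), P =>
    if (PySem.List.max? P (fun y => y)).getD 0 ≤ 2 then
      (PySem.List.max? P (fun y => y)).getD 0
    else
      1 + (PySem.List.pyRange 2 (PySem.Int.floordiv ((PySem.List.max? P (fun y => y)).getD 0) 2 + 1) 1).foldl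
          (fun b d => min b (gFF n (split P d ((PySem.List.max? P (fun y => y)).getD 0))))
          (gFF n (P.map (fun p => p - 1)))

def gF (P : List Int) : Int := gFF (muF P + 1) P

theorem le_max_getD {P : List Int} {x : Int} (hx : x ∈ P) :
    x ≤ (PySem.List.max? P (fun y => y)).getD 0 := by
  cases hmax : PySem.List.max? P (fun y => y) with
  | none =>
    rw [(PySem.List.max?_eq_none_iff P _).mp hmax] at hx
    cases hx
  | some m =>
    simpa [hmax] using PySem.List.max?_isMax hmax x hx

theorem max?_getD_mem (P : List Int)
    (h : ¬ (PySem.List.max? P (fun y => y)).getD 0 ≤ 2) :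
    (PySem.List.max? P (fun y => y)).getD 0 ∈ P := by
  cases hmax : PySem.List.max? P (fun y => y) with
  | none => simp [hmax] at h
  | some m =>
    simpa [hmax] using PySem.List.max?_mem hmax

theorem fd_mem_split {P : List Int} {m : Int} (hm : m ∈ P) (d : Int) :
    PySem.Int.floordiv m d ∈ split P d m := by
  induction P with
  | nil => cases hm
  | cons p t ih =>
    by_cases hp : p = m
    · simp [split, hp]
    · have hmt : m ∈ t := by
        rcases List.mem_cons.mp hm with h | h
        · exact absurd h.symm hp
        · exact h
      simp [split, hp, ih hmt]

theorem split_ne_nil {P : List Int} (h : P ≠ []) (d m : Int) : split P d m ≠ [] := by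
  cases P with
  | nil => exact absurd rfl h
  | cons p t =>
    by_cases hp : p = m <;> simp [split, hp]

theorem fd_bounds {m d : Int} (hd2 : 2 ≤ d) (hdm : d ≤ PySem.Int.floordiv m 2) :
    2 ≤ PySem.Int.floordiv m d ∧ PySem.Int.floordiv m d ≤ m - 2 ∧ 4 ≤ m := by
  have hd0 : (0 : Int) < d := by omega
  have hm2 : d * 2 ≤ m := (PySem.Int.le_floordiv_iff_mul_le (by omega)).mp hdm
  have hm4 : 4 ≤ m := by nlinarith
  have h2 : 2 ≤ PySem.Int.floordiv m d :=
    (PySem.Int.le_floordiv_iff_mul_le hd0).mpr (by nlinarith)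
  have hmul : (m - 1) * 2 ≤ (m - 1) * d := by
    apply mul_le_mul_of_nonneg_left hd2; omega
  have hlt : PySem.Int.floordiv m d < m - 1 :=
    (PySem.Int.floordiv_lt_iff_lt_mul hd0).mpr (by nlinarith)
  exact ⟨h2, by omega, hm4⟩

theorem mu_cons (a : Int) (t : List Int) : muF (a :: t) = (a - 2).toNat + muF t := by
  simp [muF]

theorem mu_append_singleton (t : List Int) (b : Int) :
    muF (t ++ [b]) = muF t + (b - 2).toNat := by
  simp [muF]

theorem mu_map_le (P : List Int) : muF (P.map (fun p => p - 1)) ≤ muF P := by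
  induction P with
  | nil => simp [muF]
  | cons a t ih =>
    simp only [List.map_cons, mu_cons]
    omega

theorem mu_map_lt {P : List Int} {m : Int} (hm : m ∈ P) (h3 : 3 ≤ m) :
    muF (P.map (fun p => p - 1)) < muF P := by
  induction P with
  | nil => cases hm
  | cons a t ih =>
    simp only [List.map_cons, mu_cons]
    rcases List.mem_cons.mp hm with h | h
    · subst h
      have := mu_map_le t
      omega
    · have := ih h
      omega

theorem mu_split_lt {P : List Int} {m : Int} (hm : m ∈ P) (d : Int)
    (hd2 : 2 ≤ d) (hdm : d ≤ PySem.Int.floordiv m 2) :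
    muF (split P d m) < muF P := by
  obtain ⟨ha2, haM, hm4⟩ := fd_bounds hd2 hdm
  induction P with
  | nil => cases hm
  | cons p t ih =>
    by_cases hp : p = m
    · subst hp
      have hsp : split (p :: t) d p
          = PySem.Int.floordiv p d :: (t ++ [p - PySem.Int.floordiv p d]) := by
        simp [split]
      rw [hsp, mu_cons, mu_cons, mu_append_singleton]
      omega
    · have hmt : m ∈ t := by
        rcases List.mem_cons.mp hm with h | h
        · exact absurd h.symm hp
        · exact h
      simp only [split, if_neg hp, mu_cons]
      have := ih hmt
      omega

theorem splitB_eq_split {P : List Int} {m : Int} (hm : m ∈ P) (d : Int) :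
    splitB P d m = split P d m := by
  induction P with
  | nil => cases hm
  | cons a t ih =>
    by_cases ha : a = m
    · subst ha
      have h0 : (some (0 : Int)) = some ((0 : Nat) : Int) := by norm_num
      simp only [splitB, PySem.List.index?_cons_self, h0,
        PySem.List.slice_to_natCast, split, if_pos rfl]
      simp [PySem.List.slice_from_one]
    · have hmt : m ∈ t := by
        rcases List.mem_cons.mp hm with h | h
        · exact absurd h.symm ha
        · exact h
      obtain ⟨j, hj⟩ := Option.isSome_iff_exists.mp
        ((PySem.List.index?_isSome_iff t m).mpr hmt)
      have hcast1 : ((j : Int) + 1) = (((j + 1 : Nat)) : Int) := by push_cast; ring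
      have hcast2 : (((j + 1 : Nat) : Int) + 1) = (((j + 2 : Nat)) : Int) := by push_cast; ring
      have hL : splitB (a :: t) d m
          = a :: splitB t d m := by
        simp only [splitB, PySem.List.index?_cons_of_ne t ha, hj, Option.map_some]
        simp only [hcast1, hcast2, PySem.List.slice_to_natCast, PySem.List.slice_from_natCast]
        simp [List.take_succ_cons, List.drop_succ_cons]
      rw [hL, ih hmt]
      simp [split, ha]

theorem foldl_min_congr {α : Type} (l : List α) (f g : α → Int)
    (h : ∀ x ∈ l, f x = g x) :
    ∀ a, l.foldl (fun b x => min b (f x)) a = l.foldl (fun b x => min b (g x)) a := by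
  induction l with
  | nil => intro a; rfl
  | cons x t ih =>
    intro a
    simp only [List.foldl_cons]
    rw [h x (List.mem_cons_self)]
    exact ih (fun y hy => h y (List.mem_cons_of_mem _ hy)) _

theorem le_foldl_min {α : Type} (l : List α) (g : α → Int) (a c : Int)
    (ha : c ≤ a) (hl : ∀ y ∈ l, c ≤ g y) :
    c ≤ l.foldl (fun b d => min b (g d)) a := by
  induction l generalizing a with
  | nil => simpa using ha
  | cons d t ih =>
    simp only [List.foldl_cons]
    exact ih _ (le_min ha (hl d (List.mem_cons_self))) (fun y hy => hl y (List.mem_cons_of_mem _ hy))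

theorem foldl_min_le_init {α : Type} (l : List α) (g : α → Int) :
    ∀ a, l.foldl (fun b d => min b (g d)) a ≤ a := by
  induction l with
  | nil => intro a; simp
  | cons d t ih =>
    intro a
    simp only [List.foldl_cons]
    exact le_trans (ih _) (min_le_left _ _)

theorem foldl_min_clamp {α : Type} (l : List α) (h : α → Int) (c : Int) :
    ∀ a, l.foldl (fun b d => min b (min (h d) c)) (min a c)
      = min (l.foldl (fun b d => min b (h d)) a) c := by
  induction l with
  | nil => intro a; simp
  | cons d t ih =>
    intro a
    simp only [List.foldl_cons]
    have he : min (min a c) (min (h d) c) = min (min a (h d)) c := by omega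
    rw [he, ih (min a (h d))]

theorem foldl_min_add_pure {α : Type} (l : List α) (g : α → Int) (c : Int) :
    ∀ x, l.foldl (fun b d => min b (c + g d)) (c + x)
      = c + l.foldl (fun b d => min b (g d)) x := by
  induction l with
  | nil => intro x; simp
  | cons d t ih =>
    intro x
    simp only [List.foldl_cons]
    have he : min (c + x) (c + g d) = c + min x (g d) := by omega
    rw [he, ih (min x (g d))]

theorem foldl_max_sub (t : List Int) : ∀ a : Int,
    (t.map (fun p => p - 1)).foldl max (a - 1) = t.foldl max a - 1 := by
  induction t with
  | nil => intro a; rfl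
  | cons b t ih =>
    intro a
    simp only [List.map_cons, List.foldl_cons]
    have he : max (a - 1) (b - 1) = max a b - 1 := by omega
    rw [he, ih (max a b)]

theorem max_getD_map_sub (P : List Int) (h : P ≠ []) :
    (PySem.List.max? (P.map (fun p => p - 1)) (fun y => y)).getD 0
      = (PySem.List.max? P (fun y => y)).getD 0 - 1 := by
  cases P with
  | nil => exact absurd rfl h
  | cons a t =>
    rw [List.map_cons, PySem.List.max?_id_cons, PySem.List.max?_id_cons]
    simp only [Option.getD_some]
    exact foldl_max_sub t a

-- one-step unfoldings of the ghost function
theorem gFF_succ (n : Nat) (P : List Int) :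
    gFF (n + 1) P =
      if (PySem.List.max? P (fun y => y)).getD 0 ≤ 2 then
        (PySem.List.max? P (fun y => y)).getD 0
      else
        1 + (PySem.List.pyRange 2 (PySem.Int.floordiv ((PySem.List.max? P (fun y => y)).getD 0) 2 + 1) 1).foldl
            (fun b d => min b (gFF n (split P d ((PySem.List.max? P (fun y => y)).getD 0))))
            (gFF n (P.map (fun p => p - 1))) := rfl

theorem gFF_irrel : ∀ (n : Nat), ∀ (m : Nat) (P : List Int), muF P < n → muF P < m →
    gFF n P = gFF m P := by
  intro n
  induction n with
  | zero => intro m P h _; omega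
  | succ n ih =>
    intro m P hn hm
    obtain ⟨m', rfl⟩ : ∃ m', m = m' + 1 := ⟨m - 1, by omega⟩
    rw [gFF_succ, gFF_succ]
    by_cases hle : (PySem.List.max? P (fun y => y)).getD 0 ≤ 2
    · rw [if_pos hle, if_pos hle]
    · rw [if_neg hle, if_neg hle]
      have hmem := max?_getD_mem P hle
      have hM3 : 3 ≤ (PySem.List.max? P (fun y => y)).getD 0 := by omega
      have hmaplt := mu_map_lt hmem hM3
      rw [show gFF n (P.map (fun p => p - 1)) = gFF m' (P.map (fun p => p - 1)) from
        ih m' _ (by omega) (by omega)]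
      rw [foldl_min_congr _ _
        (fun d => gFF m' (split P d ((PySem.List.max? P (fun y => y)).getD 0)))
        (fun x hx => by
          have hd := PySem.List.mem_pyRange_one.mp hx
          have hlt := mu_split_lt hmem x hd.1 (by omega)
          show gFF n (split P x ((PySem.List.max? P (fun y => y)).getD 0))
              = gFF m' (split P x ((PySem.List.max? P (fun y => y)).getD 0))
          exact ih m' (split P x ((PySem.List.max? P (fun y => y)).getD 0))
            (by omega) (by omega))]

theorem gF_base (P : List Int)
    (h : (PySem.List.max? P (fun y => y)).getD 0 ≤ 2) :
    gF P = (PySem.List.max? P (fun y => y)).getD 0 := by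
  unfold gF
  rw [gFF_succ, if_pos h]

theorem gF_pos_unfold (P : List Int)
    (h : ¬ (PySem.List.max? P (fun y => y)).getD 0 ≤ 2) :
    gF P = 1 + (PySem.List.pyRange 2
          (PySem.Int.floordiv ((PySem.List.max? P (fun y => y)).getD 0) 2 + 1) 1).foldl
        (fun b d => min b (gF (split P d ((PySem.List.max? P (fun y => y)).getD 0))))
        (gF (P.map (fun p => p - 1))) := by
  have hmem := max?_getD_mem P h
  have hM3 : 3 ≤ (PySem.List.max? P (fun y => y)).getD 0 := by omega
  have hmaplt := mu_map_lt hmem hM3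
  conv_lhs => rw [gF, gFF_succ, if_neg h]
  rw [show gFF (muF P) (P.map (fun p => p - 1)) = gF (P.map (fun p => p - 1)) from
    gFF_irrel _ _ _ (by omega) (by omega)]
  rw [foldl_min_congr _ _
    (fun d => gF (split P d ((PySem.List.max? P (fun y => y)).getD 0)))
    (fun x hx => by
      have hd := PySem.List.mem_pyRange_one.mp hx
      have hlt := mu_split_lt hmem x hd.1 (by omega)
      show gFF (muF P) (split P x ((PySem.List.max? P (fun y => y)).getD 0))
          = gF (split P x ((PySem.List.max? P (fun y => y)).getD 0))
      exact gFF_irrel (muF P) (muF (split P x ((PySem.List.max? P (fun y => y)).getD 0)) + 1)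
        (split P x ((PySem.List.max? P (fun y => y)).getD 0)) (by omega) (by omega))]

theorem two_le_gF : ∀ (n : Nat) (P : List Int), muF P < n →
    ∀ x ∈ P, 2 ≤ x → 2 ≤ gF P := by
  intro n
  induction n with
  | zero => intro P h; omega
  | succ n ih =>
    intro P hmu x hx h2x
    by_cases hle : (PySem.List.max? P (fun y => y)).getD 0 ≤ 2
    · rw [gF_base P hle]
      exact le_trans h2x (le_max_getD hx)
    · have hm := max?_getD_mem P hle
      have hM3 : 3 ≤ (PySem.List.max? P (fun y => y)).getD 0 := by omega
      have hbase : 2 ≤ gF (P.map (fun p => p - 1)) := by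
        refine ih _ (by have := mu_map_lt hm hM3; omega)
          ((PySem.List.max? P (fun y => y)).getD 0 - 1) ?_ (by omega)
        exact List.mem_map.mpr ⟨_, hm, rfl⟩
      rw [gF_pos_unfold P hle]
      have hfold : (2 : Int) ≤ (PySem.List.pyRange 2
          (PySem.Int.floordiv ((PySem.List.max? P (fun y => y)).getD 0) 2 + 1) 1).foldl
          (fun b d => min b (gF (split P d ((PySem.List.max? P (fun y => y)).getD 0))))
          (gF (P.map (fun p => p - 1))) := by
        refine le_foldl_min _ _ _ 2 hbase (fun y hy => ?_)
        have hd := PySem.List.mem_pyRange_one.mp hy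
        have hd2 : 2 ≤ y := hd.1
        have hdm : y ≤ PySem.Int.floordiv ((PySem.List.max? P (fun y => y)).getD 0) 2 := by omega
        obtain ⟨ha2, _, _⟩ := fd_bounds hd2 hdm
        exact ih _ (by have := mu_split_lt hm y hd2 hdm; omega)
          (PySem.Int.floordiv ((PySem.List.max? P (fun y => y)).getD 0) y)
          (fd_mem_split hm y) ha2
      omega

theorem three_le_gF (P : List Int)
    (h : ¬ (PySem.List.max? P (fun y => y)).getD 0 ≤ 2) : 3 ≤ gF P := by
  have hm := max?_getD_mem P h
  have hM3 : 3 ≤ (PySem.List.max? P (fun y => y)).getD 0 := by omega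
  have hbase : 2 ≤ gF (P.map (fun p => p - 1)) := by
    refine two_le_gF (muF (P.map (fun p => p - 1)) + 1) _ (by omega)
      ((PySem.List.max? P (fun y => y)).getD 0 - 1) ?_ (by omega)
    exact List.mem_map.mpr ⟨_, hm, rfl⟩
  rw [gF_pos_unfold P h]
  have hfold : (2 : Int) ≤ (PySem.List.pyRange 2
      (PySem.Int.floordiv ((PySem.List.max? P (fun y => y)).getD 0) 2 + 1) 1).foldl
      (fun b d => min b (gF (split P d ((PySem.List.max? P (fun y => y)).getD 0))))
      (gF (P.map (fun p => p - 1))) := by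
    refine le_foldl_min _ _ _ 2 hbase (fun y hy => ?_)
    have hd := PySem.List.mem_pyRange_one.mp hy
    have hd2 : 2 ≤ y := hd.1
    have hdm : y ≤ PySem.Int.floordiv ((PySem.List.max? P (fun y => y)).getD 0) 2 := by omega
    obtain ⟨ha2, _, _⟩ := fd_bounds hd2 hdm
    exact two_le_gF (muF (split P y ((PySem.List.max? P (fun y => y)).getD 0)) + 1) _ (by omega)
      (PySem.Int.floordiv ((PySem.List.max? P (fun y => y)).getD 0) y)
      (fd_mem_split hm y) ha2
  omega

theorem gF_le_max : ∀ (n : Nat) (P : List Int), muF P < n →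
    ¬ (PySem.List.max? P (fun y => y)).getD 0 ≤ 2 →
    gF P ≤ (PySem.List.max? P (fun y => y)).getD 0 := by
  intro n
  induction n with
  | zero => intro P h; omega
  | succ n ih =>
    intro P hmu h
    have hm := max?_getD_mem P h
    have hM3 : 3 ≤ (PySem.List.max? P (fun y => y)).getD 0 := by omega
    have hPne : P ≠ [] := by intro hnil; rw [hnil] at hm; cases hm
    have hPm1max := max_getD_map_sub P hPne
    have hPm1le : gF (P.map (fun p => p - 1)) ≤ (PySem.List.max? P (fun y => y)).getD 0 - 1 := by
      by_cases hsm : (PySem.List.max? (P.map (fun p => p - 1)) (fun y => y)).getD 0 ≤ 2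
      · rw [gF_base _ hsm, hPm1max]
      · have := ih (P.map (fun p => p - 1))
          (by have := mu_map_lt hm hM3; omega) hsm
        omega
    rw [gF_pos_unfold P h]
    have hfle := foldl_min_le_init
      (PySem.List.pyRange 2 (PySem.Int.floordiv ((PySem.List.max? P (fun y => y)).getD 0) 2 + 1) 1)
      (fun d => gF (split P d ((PySem.List.max? P (fun y => y)).getD 0)))
      (gF (P.map (fun p => p - 1)))
    omega

-- one-step unfoldings of B's port
theorem fAltF_succ (n : Nat) (P : List Int) (cap : Int) :
    fAltF (n + 1) P cap =
      if (PySem.List.max? P (fun y => y)).getD 0 ≤ 2 then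
        min ((PySem.List.max? P (fun y => y)).getD 0) cap
      else if min cap ((PySem.List.max? P (fun y => y)).getD 0) ≤ 2 then
        min cap ((PySem.List.max? P (fun y => y)).getD 0)
      else
        (PySem.List.pyRange 2 (PySem.Int.floordiv ((PySem.List.max? P (fun y => y)).getD 0) 2 + 1) 1).foldl
          (fun b d => min b (1 + fAltF n (splitB P d ((PySem.List.max? P (fun y => y)).getD 0))
            (min cap ((PySem.List.max? P (fun y => y)).getD 0) - 1)))
          (1 + fAltF n (P.map (fun p => p - 1)) (min cap ((PySem.List.max? P (fun y => y)).getD 0) - 1)) := rfl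

theorem fAltF_irrel : ∀ (n : Nat), ∀ (m : Nat) (P : List Int) (cap : Int), muF P < n → muF P < m →
    fAltF n P cap = fAltF m P cap := by
  intro n
  induction n with
  | zero => intro m P cap h _; omega
  | succ n ih =>
    intro m P cap hn hm
    obtain ⟨m', rfl⟩ : ∃ m', m = m' + 1 := ⟨m - 1, by omega⟩
    rw [fAltF_succ, fAltF_succ]
    by_cases hle : (PySem.List.max? P (fun y => y)).getD 0 ≤ 2
    · rw [if_pos hle, if_pos hle]
    · rw [if_neg hle, if_neg hle]
      by_cases hcap : min cap ((PySem.List.max? P (fun y => y)).getD 0) ≤ 2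
      · rw [if_pos hcap, if_pos hcap]
      · rw [if_neg hcap, if_neg hcap]
        have hmem := max?_getD_mem P hle
        have hM3 : 3 ≤ (PySem.List.max? P (fun y => y)).getD 0 := by omega
        have hmaplt := mu_map_lt hmem hM3
        rw [show fAltF n (P.map (fun p => p - 1)) (min cap ((PySem.List.max? P (fun y => y)).getD 0) - 1)
            = fAltF m' (P.map (fun p => p - 1)) (min cap ((PySem.List.max? P (fun y => y)).getD 0) - 1) from
          ih m' _ _ (by omega) (by omega)]
        rw [foldl_min_congr _ _
          (fun d => 1 + fAltF m' (splitB P d ((PySem.List.max? P (fun y => y)).getD 0))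
            (min cap ((PySem.List.max? P (fun y => y)).getD 0) - 1))
          (fun x hx => by
            have hd := PySem.List.mem_pyRange_one.mp hx
            have hlt := mu_split_lt hmem x hd.1 (by omega)
            show 1 + fAltF n (splitB P x ((PySem.List.max? P (fun y => y)).getD 0))
                (min cap ((PySem.List.max? P (fun y => y)).getD 0) - 1)
              = 1 + fAltF m' (splitB P x ((PySem.List.max? P (fun y => y)).getD 0))
                (min cap ((PySem.List.max? P (fun y => y)).getD 0) - 1)
            rw [splitB_eq_split hmem x]
            rw [ih m' (split P x ((PySem.List.max? P (fun y => y)).getD 0)) _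
              (by omega) (by omega)])]

theorem fAlt_m2 (P : List Int) (cap : Int)
    (h : (PySem.List.max? P (fun y => y)).getD 0 ≤ 2) :
    fAlt P cap = min ((PySem.List.max? P (fun y => y)).getD 0) cap := by
  unfold fAlt
  rw [fAltF_succ, if_pos h]

theorem fAlt_cap2 (P : List Int) (cap : Int)
    (h : ¬ (PySem.List.max? P (fun y => y)).getD 0 ≤ 2)
    (hc : min cap ((PySem.List.max? P (fun y => y)).getD 0) ≤ 2) :
    fAlt P cap = min cap ((PySem.List.max? P (fun y => y)).getD 0) := by
  unfold fAlt
  rw [fAltF_succ, if_neg h, if_pos hc]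

theorem fAlt_pos_unfold (P : List Int) (cap : Int)
    (h : ¬ (PySem.List.max? P (fun y => y)).getD 0 ≤ 2)
    (hc : ¬ min cap ((PySem.List.max? P (fun y => y)).getD 0) ≤ 2) :
    fAlt P cap = (PySem.List.pyRange 2
          (PySem.Int.floordiv ((PySem.List.max? P (fun y => y)).getD 0) 2 + 1) 1).foldl
        (fun b d => min b (1 + fAlt (split P d ((PySem.List.max? P (fun y => y)).getD 0))
          (min cap ((PySem.List.max? P (fun y => y)).getD 0) - 1)))
        (1 + fAlt (P.map (fun p => p - 1)) (min cap ((PySem.List.max? P (fun y => y)).getD 0) - 1)) := by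
  have hmem := max?_getD_mem P h
  have hM3 : 3 ≤ (PySem.List.max? P (fun y => y)).getD 0 := by omega
  have hmaplt := mu_map_lt hmem hM3
  conv_lhs => rw [fAlt, fAltF_succ, if_neg h, if_neg hc]
  rw [show fAltF (muF P) (P.map (fun p => p - 1)) (min cap ((PySem.List.max? P (fun y => y)).getD 0) - 1)
      = fAlt (P.map (fun p => p - 1)) (min cap ((PySem.List.max? P (fun y => y)).getD 0) - 1) from
    fAltF_irrel _ _ _ _ (by omega) (by omega)]
  rw [foldl_min_congr _ _
    (fun d => 1 + fAlt (split P d ((PySem.List.max? P (fun y => y)).getD 0))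
      (min cap ((PySem.List.max? P (fun y => y)).getD 0) - 1))
    (fun x hx => by
      have hd := PySem.List.mem_pyRange_one.mp hx
      have hlt := mu_split_lt hmem x hd.1 (by omega)
      show 1 + fAltF (muF P) (splitB P x ((PySem.List.max? P (fun y => y)).getD 0))
          (min cap ((PySem.List.max? P (fun y => y)).getD 0) - 1)
        = 1 + fAlt (split P x ((PySem.List.max? P (fun y => y)).getD 0))
          (min cap ((PySem.List.max? P (fun y => y)).getD 0) - 1)
      rw [splitB_eq_split hmem x]
      rw [fAltF_irrel (muF P) (muF (split P x ((PySem.List.max? P (fun y => y)).getD 0)) + 1)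
        (split P x ((PySem.List.max? P (fun y => y)).getD 0)) _ (by omega) (by omega)]
      rfl)]

-- B's truncated function computes exactly min (gF P) cap
theorem fCap_eq : ∀ (n : Nat) (P : List Int), muF P < n →
    ∀ cap : Int, fAlt P cap = min (gF P) cap := by
  intro n
  induction n with
  | zero => intro P h; omega
  | succ n ih =>
    intro P hmu cap
    by_cases hle : (PySem.List.max? P (fun y => y)).getD 0 ≤ 2
    · rw [fAlt_m2 P cap hle, gF_base P hle]
    · by_cases hcap : min cap ((PySem.List.max? P (fun y => y)).getD 0) ≤ 2
      · rw [fAlt_cap2 P cap hle hcap]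
        have h3 := three_le_gF P hle
        omega
      · rw [fAlt_pos_unfold P cap hle hcap]
        have hm := max?_getD_mem P hle
        have hM3 : 3 ≤ (PySem.List.max? P (fun y => y)).getD 0 := by omega
        have hmaplt := mu_map_lt hm hM3
        -- rewrite children by the induction hypothesis, in clamped form
        rw [show (1 : Int) + fAlt (P.map (fun p => p - 1))
              (min cap ((PySem.List.max? P (fun y => y)).getD 0) - 1)
            = min (1 + gF (P.map (fun p => p - 1)))
              (min cap ((PySem.List.max? P (fun y => y)).getD 0)) from by
          rw [ih _ (by omega) _]; omega]
        rw [foldl_min_congr _ _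
          (fun d => min (1 + gF (split P d ((PySem.List.max? P (fun y => y)).getD 0)))
            (min cap ((PySem.List.max? P (fun y => y)).getD 0)))
          (fun x hx => by
            have hd := PySem.List.mem_pyRange_one.mp hx
            have hlt := mu_split_lt hm x hd.1 (by omega)
            show 1 + fAlt (split P x ((PySem.List.max? P (fun y => y)).getD 0))
                (min cap ((PySem.List.max? P (fun y => y)).getD 0) - 1)
              = min (1 + gF (split P x ((PySem.List.max? P (fun y => y)).getD 0)))
                (min cap ((PySem.List.max? P (fun y => y)).getD 0))
            rw [ih _ (by omega) _]; omega)]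
        rw [foldl_min_clamp _
          (fun d => 1 + gF (split P d ((PySem.List.max? P (fun y => y)).getD 0)))
          (min cap ((PySem.List.max? P (fun y => y)).getD 0))
          (1 + gF (P.map (fun p => p - 1)))]
        rw [foldl_min_add_pure _
          (fun d => gF (split P d ((PySem.List.max? P (fun y => y)).getD 0))) 1
          (gF (P.map (fun p => p - 1)))]
        have hb := gF_le_max (muF P + 1) P (by omega) hle
        rw [gF_pos_unfold P hle] at hb ⊢
        omega

theorem foldl_min_add (ds : List Int) (g : Int → Int) (a c : Int) :
    ∀ x, ds.foldl (fun b d => min b (c + g d)) (min a (c + x))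
      = min a (c + ds.foldl (fun b d => min b (g d)) x) := by
  induction ds with
  | nil => intro x; simp
  | cons d t ih =>
    intro x
    simp only [List.foldl_cons]
    have h : min (min a (c + x)) (c + g d) = min a (c + min x (g d)) := by omega
    rw [h, ih (min x (g d))]

theorem optimizeF_succ (fuel : Nat) (P : List Int) (i best : Int) :
    optimizeF (fuel + 1) P i best =
      if (PySem.List.max? P (fun y => y)).getD 0 ≤ 2 then
        min best (i + (PySem.List.max? P (fun y => y)).getD 0)
      else if i ≥ best then best
      else
        (PySem.List.pyRange 2 (PySem.Int.floordiv ((PySem.List.max? P (fun y => y)).getD 0) 2 + 1) 1).foldl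
          (fun b d => optimizeF fuel (split P d ((PySem.List.max? P (fun y => y)).getD 0)) (i + 1) b)
          (optimizeF fuel (P.map (fun p => p - 1)) (i + 1) best) := rfl

theorem optF_eq : ∀ (fuel : Nat) (P : List Int) (i best : Int), P ≠ [] →
    best - i ≤ (fuel : Int) →
    optimizeF (fuel + 1) P i best = min best (i + gF P) := by
  intro fuel
  induction fuel with
  | zero =>
    intro P i best hP hle
    rw [optimizeF_succ]
    split_ifs with h1 h2
    · rw [gF_base P h1]
    · have h2f : 3 ≤ gF P := three_le_gF P h1
      omega
    · exfalso
      simp only [Nat.cast_zero] at hle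
      omega
  | succ k ih =>
    intro P i best hP hle
    rw [optimizeF_succ]
    split_ifs with h1 h2
    · rw [gF_base P h1]
    · have h2f : 3 ≤ gF P := three_le_gF P h1
      omega
    · have hle' : best - i ≤ ((k : Int) + 1) := by
        push_cast at hle; omega
      have hmapne : P.map (fun p => p - 1) ≠ [] := by
        cases P with
        | nil => exact absurd rfl hP
        | cons a t => simp
      rw [ih _ (i + 1) best hmapne (by omega)]
      have hstep : ∀ (ds : List Int) (b : Int), b ≤ best →
          ds.foldl (fun b d => optimizeF (k + 1) (split P d ((PySem.List.max? P (fun y => y)).getD 0)) (i + 1) b) b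
          = ds.foldl (fun b d => min b ((i + 1) + gF (split P d ((PySem.List.max? P (fun y => y)).getD 0)))) b := by
        intro ds
        induction ds with
        | nil => intro b _; rfl
        | cons d t iht =>
          intro b hb
          simp only [List.foldl_cons]
          rw [ih _ (i + 1) b (split_ne_nil hP _ _) (by omega)]
          exact iht _ (le_trans (min_le_left _ _) hb)
      rw [hstep _ _ (min_le_left _ _)]
      rw [foldl_min_add _ (fun d => gF (split P d ((PySem.List.max? P (fun y => y)).getD 0))) best (i + 1)]
      rw [gF_pos_unfold P h1]
      have : (i + 1) + (PySem.List.pyRange 2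
            (PySem.Int.floordiv ((PySem.List.max? P (fun y => y)).getD 0) 2 + 1) 1).foldl
          (fun b d => min b (gF (split P d ((PySem.List.max? P (fun y => y)).getD 0))))
          (gF (P.map (fun p => p - 1)))
          = i + (1 + (PySem.List.pyRange 2
            (PySem.Int.floordiv ((PySem.List.max? P (fun y => y)).getD 0) 2 + 1) 1).foldl
          (fun b d => min b (gF (split P d ((PySem.List.max? P (fun y => y)).getD 0))))
          (gF (P.map (fun p => p - 1)))) := by ring
      rw [this]

-- ===== VERDICT (by name: the statement is the Claim_ definition above) =====
theorem optimize_spec : Claim_equal_optimize := by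
  intro P i best _hd hP
  show optimize P i best = optimize_alt P i best
  unfold optimize optimize_alt
  rw [optF_eq ((best - i).toNat) P i best hP (by omega)]
  rw [fCap_eq (muF P + 1) P (by omega) (best - i)]
  omega
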